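-- pv_equiv track=rewrite | github.com/Desipeli/adventofcode2023 | day13_1.py | find_reflections
-- ===== SOURCE A (Python) =====
-- def find_reflections(block: list, istart: int = 0, iplus: int = 0):
--     i1 = istart - iplus
--     i2 = istart + iplus + 1
--     if i1 == len(block)-1:  # Ei voida aloittaa viimeiseltä riviltä
--         return False
--     if i1 < 0 or i2 >= len(block):  # Ollaan menty rajan yli, eli löytyi
--         return True
--     if not block[i1] == block[i2]:
--         return False
--     return find_reflections(block, istart, iplus+1)
-- ===== SOURCE B (Python) =====
-- def find_reflections(block: list, istart: int = 0, iplus: int = 0):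
--     n = len(block)
--     i1 = istart - iplus
--     i2 = istart + iplus + 1
--     if i1 == n - 1:
--         return False
--     if i1 < 0 or i2 >= n:
--         return True
--     up = block[:i1 + 1][::-1]
--     down = block[i2:]
--     return all(a == b for a, b in zip(up, down))
-- ===== Notes on version B (the rewrite author's own statement) =====
-- stated objective: alternative
-- what changed: Replaces A's tail recursion that walks outward one row pair per call with a non-recursive formulation: after the same three entry guards, B slices the rows above the mirror line (reversed) and the rows below it and compares them pairwise with zip/all.
-- outside the precondition, e.g. on find_reflections(['a', 'b', 'x', 'x'], 0, -2): A returns False, B returns True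
import Mathlib
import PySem

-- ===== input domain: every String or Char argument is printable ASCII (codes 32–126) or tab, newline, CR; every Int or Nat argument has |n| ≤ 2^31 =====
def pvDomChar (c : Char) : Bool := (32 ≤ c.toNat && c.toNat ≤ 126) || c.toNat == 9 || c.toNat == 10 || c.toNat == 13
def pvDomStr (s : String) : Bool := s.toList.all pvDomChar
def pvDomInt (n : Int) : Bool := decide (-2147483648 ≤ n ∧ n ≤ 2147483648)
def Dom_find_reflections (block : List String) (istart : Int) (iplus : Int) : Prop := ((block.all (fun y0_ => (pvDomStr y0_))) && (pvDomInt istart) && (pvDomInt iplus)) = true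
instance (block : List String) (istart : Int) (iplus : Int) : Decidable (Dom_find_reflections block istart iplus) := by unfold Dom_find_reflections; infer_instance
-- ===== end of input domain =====

-- B replaces A's recursion by comparing the reversed prefix above the mirror line with the suffix below it (zip of two slices); equivalence is about the return value only.

-- ===== PORT A =====
def find_reflections (block : List String) (istart : Int) (iplus : Int) : Bool :=
  let i1 := istart - iplus
  let i2 := istart + iplus + 1
  if i1 = (block.length : Int) - 1 then false
  else if i1 < 0 ∨ (block.length : Int) ≤ i2 then true
  else match PySem.List.pyGet? block i1, PySem.List.pyGet? block i2 with
    | some a, some b =>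
        if ¬ (a == b) then false
        else find_reflections block istart (iplus + 1)
    | _, _ => false  -- Python raises IndexError here; Pre_ excludes these inputs
termination_by ((block.length : Int) - (istart + iplus + 1)).toNat
decreasing_by omega

-- ===== PORT B =====
def find_reflections_alt (block : List String) (istart : Int) (iplus : Int) : Bool :=
  let n : Int := block.length
  let i1 := istart - iplus
  let i2 := istart + iplus + 1
  if i1 = n - 1 then false
  else if i1 < 0 ∨ n ≤ i2 then true
  else
    let up := (PySem.List.slice block none (some (i1 + 1))).reverse   -- block[:i1+1][::-1]
    let down := PySem.List.slice block (some i2) none                 -- block[i2:]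
    (up.zip down).all (fun p => p.1 == p.2)

-- ===== PRECONDITION & SPEC =====
-- Pre_ excludes exactly the calls (reachable only with iplus < 0) whose first row comparison
-- indexes out of range (A raises IndexError) or uses a negative index i2 < 0, where A's value
-- comes from Python's negative-index wraparound — an accident of the representation.
def Pre_find_reflections (block : List String) (istart : Int) (iplus : Int) : Prop :=
  istart - iplus = (block.length : Int) - 1 ∨
  istart - iplus < 0 ∨
  (block.length : Int) ≤ istart + iplus + 1 ∨
  (istart - iplus < (block.length : Int) - 1 ∧ 0 ≤ istart + iplus + 1)
instance (block : List String) (istart : Int) (iplus : Int) : Decidable (Pre_find_reflections block istart iplus) := by unfold Pre_find_reflections; infer_instance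
def pvWitness_find_reflections : List String × Int × Int := (["ab", "ab"], 0, 0)

def Spec_find_reflections (block : List String) (istart : Int) (iplus : Int) (out : Bool) : Prop := out = find_reflections_alt block istart iplus
instance (block : List String) (istart : Int) (iplus : Int) (out : Bool) : Decidable (Spec_find_reflections block istart iplus out) := by unfold Spec_find_reflections; infer_instance

-- ===== CLAIM (what is proved, stated in full; the proofs are below) =====
def Claim_equal_find_reflections : Prop := ∀ (block : List String) (istart : Int) (iplus : Int), Dom_find_reflections block istart iplus → Pre_find_reflections block istart iplus → Spec_find_reflections block istart iplus (find_reflections block istart iplus)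
-- ===== LEMMAS AND PROOFS =====

theorem zip_step (block : List String) (a c : Nat) (ha : a < block.length) (hc : c < block.length) :
    ((block.take (a+1)).reverse.zip (block.drop c)) =
    (block[a], block[c]) :: ((block.take a).reverse.zip (block.drop (c+1))) := by
  rw [List.take_add_one, List.drop_eq_getElem_cons hc, List.getElem?_eq_getElem ha]
  simp only [Option.toList_some, List.reverse_append, List.reverse_cons, List.reverse_nil,
    List.nil_append, List.cons_append, List.zip_cons_cons]

theorem alt_unfold (block : List String) (istart x : Int)
    (h1 : ¬ (istart - x = (block.length : Int) - 1))
    (h2 : ¬ (istart - x < 0 ∨ (block.length : Int) ≤ istart + x + 1))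
    (h3 : 0 ≤ istart + x + 1) :
    find_reflections_alt block istart x =
      (((block.take ((istart - x).toNat + 1)).reverse.zip
        (block.drop (istart + x + 1).toNat)).all fun p => p.1 == p.2) := by
  rw [find_reflections_alt]
  simp only [if_neg h1, if_neg h2]
  rw [PySem.List.slice_to block (b := istart - x + 1) (by omega),
      PySem.List.slice_from block (a := istart + x + 1) h3,
      show (istart - x + 1).toNat = (istart - x).toNat + 1 from by omega]

theorem main_equiv : ∀ (block : List String) (istart iplus : Int),
    Pre_find_reflections block istart iplus →
    find_reflections block istart iplus = find_reflections_alt block istart iplus := by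
  intro block istart iplus
  induction iplus using find_reflections.induct (block := block) (istart := istart) with
  | case1 x i1 h1 =>
    intro _
    have h1' : istart - x = (block.length : Int) - 1 := h1
    rw [find_reflections, find_reflections_alt]
    simp [h1']
  | case2 x i1 i2 h1 h2 =>
    intro _
    have h1' : ¬ (istart - x = (block.length : Int) - 1) := h1
    have h2' : istart - x < 0 ∨ (block.length : Int) ≤ istart + x + 1 := h2
    rw [find_reflections, find_reflections_alt]
    simp only [if_neg h1', if_pos h2']
  | case3 x i1 i2 h1 h2 a b hb ha hab =>
    intro hpre
    have h1' : ¬ (istart - x = (block.length : Int) - 1) := h1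
    have h2' : ¬ (istart - x < 0 ∨ (block.length : Int) ≤ istart + x + 1) := h2
    have ha' : PySem.List.pyGet? block (istart - x) = some a := ha
    have hb' : PySem.List.pyGet? block (istart + x + 1) = some b := hb
    have hbounds : 0 ≤ istart - x ∧ istart - x < (block.length : Int) - 1 ∧
        0 ≤ istart + x + 1 ∧ istart + x + 1 < (block.length : Int) := by
      unfold Pre_find_reflections at hpre; omega
    have hA : (istart - x).toNat < block.length := by omega
    have hC : (istart + x + 1).toNat < block.length := by omega
    have hav : a = block[(istart - x).toNat] := by
      have := PySem.List.pyGet?_eq_some_getElem block (i := istart - x) (by omega) (by omega)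
      rw [ha'] at this; exact Option.some.inj this
    have hbv : b = block[(istart + x + 1).toNat] := by
      have := PySem.List.pyGet?_eq_some_getElem block (i := istart + x + 1) (by omega) (by omega)
      rw [hb'] at this; exact Option.some.inj this
    have hfalse : (block[(istart - x).toNat] == block[(istart + x + 1).toNat]) = false := by
      rw [← hav, ← hbv]; simpa using hab
    rw [find_reflections]
    simp only [if_neg h1', if_neg h2', ha', hb', if_pos hab]
    rw [alt_unfold block istart x h1' h2' (by omega), zip_step block _ _ hA hC, List.all_cons,
        hfalse, Bool.false_and]
  | case4 x i1 i2 h1 h2 a b hb ha hab ih =>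
    intro hpre
    have h1' : ¬ (istart - x = (block.length : Int) - 1) := h1
    have h2' : ¬ (istart - x < 0 ∨ (block.length : Int) ≤ istart + x + 1) := h2
    have ha' : PySem.List.pyGet? block (istart - x) = some a := ha
    have hb' : PySem.List.pyGet? block (istart + x + 1) = some b := hb
    have hbounds : 0 ≤ istart - x ∧ istart - x < (block.length : Int) - 1 ∧
        0 ≤ istart + x + 1 ∧ istart + x + 1 < (block.length : Int) := by
      unfold Pre_find_reflections at hpre; omega
    have hA : (istart - x).toNat < block.length := by omega
    have hC : (istart + x + 1).toNat < block.length := by omega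
    have hav : a = block[(istart - x).toNat] := by
      have := PySem.List.pyGet?_eq_some_getElem block (i := istart - x) (by omega) (by omega)
      rw [ha'] at this; exact Option.some.inj this
    have hbv : b = block[(istart + x + 1).toNat] := by
      have := PySem.List.pyGet?_eq_some_getElem block (i := istart + x + 1) (by omega) (by omega)
      rw [hb'] at this; exact Option.some.inj this
    have htrue : (block[(istart - x).toNat] == block[(istart + x + 1).toNat]) = true := by
      rw [← hav, ← hbv]; simpa using hab
    have hpre' : Pre_find_reflections block istart (x + 1) := by
      unfold Pre_find_reflections; omega
    have hArec : find_reflections block istart x = find_reflections block istart (x + 1) := by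
      rw [find_reflections]
      simp only [if_neg h1', if_neg h2', ha', hb', if_neg hab]
    rw [hArec, ih hpre', alt_unfold block istart x h1' h2' (by omega),
        zip_step block _ _ hA hC, List.all_cons, htrue, Bool.true_and]
    by_cases hstop : istart - (x + 1) < 0 ∨ (block.length : Int) ≤ istart + (x + 1) + 1
    · -- the recursive B call returns true, and the remaining zip is empty
      rw [find_reflections_alt]
      rw [if_neg (show ¬ (istart - (x+1) = (block.length : Int) - 1) from by omega), if_pos hstop]
      rcases hstop with hs | hs
      · have h0 : (istart - x).toNat = 0 := by omega
        simp [h0]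
      · have h0 : (istart + x + 1).toNat + 1 = block.length := by omega
        simp [h0]
    · rw [alt_unfold block istart (x + 1) (by omega) hstop (by omega)]
      rw [show (istart - (x + 1)).toNat + 1 = (istart - x).toNat from by omega,
          show (istart + (x + 1) + 1).toNat = (istart + x + 1).toNat + 1 from by omega]
  | case5 x i1 i2 h1 h2 h3 =>
    intro hpre
    have hbounds : 0 ≤ istart - x ∧ istart - x < (block.length : Int) - 1 ∧
        0 ≤ istart + x + 1 ∧ istart + x + 1 < (block.length : Int) := by
      unfold Pre_find_reflections at hpre; omega
    exact (h3 block[(istart - x).toNat] block[(istart + x + 1).toNat]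
      (PySem.List.pyGet?_eq_some_getElem block (i := istart - x) (by omega) (by omega))
      (PySem.List.pyGet?_eq_some_getElem block (i := istart + x + 1) (by omega) (by omega))).elim

-- ===== VERDICT =====
theorem find_reflections_spec : Claim_equal_find_reflections := by
  intro block istart iplus _ hpre
  exact main_equiv block istart iplus hpre
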